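-- pv_equiv track=rewrite | github.com/thecodingbc/PYTHON | DATA_ANALYSIS/python_0135_practice_add_number.py | solution3_math2
-- ===== SOURCE A (Python) =====
-- def solution3_math2(base_number, term_count):
--     sum = 0
--
--     for x in range(term_count):
--
--         '''
--         1 = 10^0
--         11 = 10 + 1 = 10^1 + 10^0
--         111 = 100 + 10 + 1 = 10^2 + 10^1 + 10^0
--         '''
--         for j in range(x+1):
--             sum += 10 ** j
--
--     return sum * base_number
-- ===== SOURCE B (Python) =====
-- def solution3_math2(base_number, term_count):
--     # Closed form: sum of first n repunits = (10**(n+1) - 10 - 9n) / 81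
--     if term_count <= 0:
--         return 0
--     n = term_count
--     return (10 ** (n + 1) - 10 - 9 * n) // 81 * base_number
-- ===== Notes on version B (the rewrite author's own statement) =====
-- stated objective: faster
-- what changed: Replaced the quadratic nested repunit-summing loops with the closed-form geometric formula (10^(n+1)-10-9n)//81 times the base.
import Mathlib
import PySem

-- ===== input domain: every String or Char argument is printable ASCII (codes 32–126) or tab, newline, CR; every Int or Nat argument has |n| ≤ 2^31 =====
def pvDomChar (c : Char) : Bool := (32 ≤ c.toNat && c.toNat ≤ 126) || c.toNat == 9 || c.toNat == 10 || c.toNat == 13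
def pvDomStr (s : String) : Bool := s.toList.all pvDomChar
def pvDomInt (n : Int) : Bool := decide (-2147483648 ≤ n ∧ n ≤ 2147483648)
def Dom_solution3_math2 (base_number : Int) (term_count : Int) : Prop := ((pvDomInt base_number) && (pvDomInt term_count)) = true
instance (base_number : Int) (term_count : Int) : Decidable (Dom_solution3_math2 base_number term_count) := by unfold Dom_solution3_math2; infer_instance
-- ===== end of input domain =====

-- B replaces A's quadratic nested repunit-summing loops with the closed-form
-- formula (10^(n+1) - 10 - 9n) // 81 * base (objective: faster, asymptotic).

-- ===== PORT A =====
-- nested loops: for x in range(term_count): for j in range(x+1): sum += 10**j; return sum * base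
def solution3_math2 (base_number : Int) (term_count : Int) : Int :=
  ((PySem.List.pyRange 0 term_count).foldl
    (fun s x => (PySem.List.pyRange 0 (x + 1)).foldl (fun s2 j => s2 + 10 ^ j.toNat) s)
    0) * base_number
  -- 10 ** j ported as 10 ^ j.toNat: exact since every j of range(x+1) with x ≥ 0 is nonnegative

-- ===== PORT B =====
def solution3_math2_alt (base_number : Int) (term_count : Int) : Int :=
  if term_count ≤ 0 then 0
  else PySem.Int.floordiv (10 ^ (term_count + 1).toNat - 10 - 9 * term_count) 81 * base_number
  -- 10 ** (n+1) ported as 10 ^ (n+1).toNat: exact since n ≥ 1 on this branch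

-- ===== PRECONDITION & SPEC =====
def Spec_solution3_math2 (base_number : Int) (term_count : Int) (out : Int) : Prop := out = solution3_math2_alt base_number term_count
instance (base_number : Int) (term_count : Int) (out : Int) : Decidable (Spec_solution3_math2 base_number term_count out) := by unfold Spec_solution3_math2; infer_instance

-- ===== CLAIM (what is proved, stated in full; the proofs are below) =====
def Claim_equal_solution3_math2 : Prop := ∀ (base_number : Int) (term_count : Int), Dom_solution3_math2 base_number term_count → Spec_solution3_math2 base_number term_count (solution3_math2 base_number term_count)

-- ===== LEMMAS AND PROOFS =====

-- the inner loop adds the x+1-digit repunit to the accumulator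
theorem inner_fold (n : Nat) (s : Int) :
    (PySem.List.pyRange 0 (n : Int)).foldl (fun s2 j => s2 + 10 ^ j.toNat) s
      = s + ((PySem.List.pyRange 0 (n : Int)).map (fun j => (10:Int) ^ j.toNat)).sum :=
  PySem.List.foldl_add _ _ s

-- 9 × (repunit with n digits) = 10^n - 1
theorem repunit_sum (n : Nat) :
    9 * ((PySem.List.pyRange 0 (n : Int)).map (fun j => (10:Int) ^ j.toNat)).sum
      = 10 ^ n - 1 := by
  induction n with
  | zero => simp [PySem.List.pyRange]
  | succ k ih =>
    rw [show ((k + 1 : Nat) : Int) = (k : Int) + 1 by push_cast; ring,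
        PySem.List.pyRange_one_succ_right (by positivity)]
    simp only [List.map_append, List.sum_append, List.map_cons, List.map_nil, List.sum_cons,
      List.sum_nil, Int.toNat_natCast]
    rw [mul_add, ih, pow_succ]
    ring

-- the outer fold accumulates the total T n with 81·T n = 10^(n+1) - 10 - 9n
theorem outer_fold (n : Nat) (s : Int) :
    81 * ((PySem.List.pyRange 0 (n : Int)).foldl
      (fun s x => (PySem.List.pyRange 0 (x + 1)).foldl (fun s2 j => s2 + 10 ^ j.toNat) s) s - s)
      = 10 ^ (n + 1) - 10 - 9 * n := by
  induction n generalizing s with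
  | zero => simp [PySem.List.pyRange]
  | succ k ih =>
    rw [show ((k + 1 : Nat) : Int) = (k : Int) + 1 by push_cast; ring,
        PySem.List.pyRange_one_succ_right (by positivity), List.foldl_append]
    simp only [List.foldl_cons, List.foldl_nil]
    rw [show ((k:Int) + 1) = ((k + 1 : Nat) : Int) by push_cast; ring, inner_fold]
    have h9 := repunit_sum (k + 1)
    have hik := ih s
    have hpow : (10:Int) ^ (k + 1 + 1) = 10 ^ (k + 1) * 10 := pow_succ 10 (k + 1)
    push_cast at h9 hik hpow ⊢
    linarith [hik, h9, hpow]

theorem solution3_math2_eq (base_number term_count : Int) :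
    solution3_math2 base_number term_count = solution3_math2_alt base_number term_count := by
  unfold solution3_math2 solution3_math2_alt
  split_ifs with h
  · have : PySem.List.pyRange 0 term_count = [] := by
      simp [PySem.List.pyRange]; omega
    simp [this]
  · push_neg at h
    obtain ⟨m, rfl⟩ : ∃ m : Nat, term_count = (m : Int) := ⟨term_count.toNat, by omega⟩
    have h81 := outer_fold m 0
    have hfd : PySem.Int.floordiv (10 ^ ((m : Int) + 1).toNat - 10 - 9 * (m : Int)) 81
        = ((PySem.List.pyRange 0 (m : Int)).foldl
          (fun s x => (PySem.List.pyRange 0 (x + 1)).foldl (fun s2 j => s2 + 10 ^ j.toNat) s) 0) := by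
      rw [PySem.Int.floordiv_eq_ediv_of_pos (by norm_num)]
      rw [show ((m : Int) + 1).toNat = m + 1 by omega]
      rw [show (10:Int) ^ (m + 1) - 10 - 9 * (m : Int)
            = 81 * ((PySem.List.pyRange 0 (m : Int)).foldl
              (fun s x => (PySem.List.pyRange 0 (x + 1)).foldl (fun s2 j => s2 + 10 ^ j.toNat) s) 0)
          by linarith [h81]]
      exact Int.mul_ediv_cancel_left _ (by norm_num)
    rw [hfd]

-- ===== VERDICT (by name: the statement is the Claim_ definition above) =====
theorem solution3_math2_spec : Claim_equal_solution3_math2 := by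
  intro b n _
  exact solution3_math2_eq b n
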